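-- pv_equiv track=rewrite | github.com/anysearch-ai/anysearch-skills | anysearch_cli.py | _split_json_items
-- ===== SOURCE A (Python) =====
-- def _split_json_items(s: str) -> list:
--     depth = 0
--     current = []
--     items = []
--     for ch in s:
--         if ch == "{":
--             depth += 1
--         elif ch == "}":
--             depth -= 1
--         if ch == "," and depth == 0:
--             items.append("".join(current))
--             current = []
--         else:
--             current.append(ch)
--     if current:
--         tail = "".join(current).strip()
--         if tail:
--             items.append(tail)
--     return items
-- ===== SOURCE B (Python) =====
-- def _split_json_items(s: str) -> list:
--     # Two passes: record the index of every top-level comma, then slice s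
--     # between consecutive comma indices; only the final segment is stripped.
--     depth = 0
--     commas = []
--     for i, ch in enumerate(s):
--         if ch == "{":
--             depth += 1
--         elif ch == "}":
--             depth -= 1
--         if ch == "," and depth == 0:
--             commas.append(i)
--     items = []
--     start = 0
--     for i in commas:
--         items.append(s[start:i])
--         start = i + 1
--     tail = s[start:].strip()
--     if tail:
--         items.append(tail)
--     return items
-- ===== Notes on version B (the rewrite author's own statement) =====
-- stated objective: alternative
-- what changed: Replaces A's single accumulate-and-flush loop (building each segment char by char) with two passes: one pass recording the indices of top-level commas, then slicing the string between consecutive comma indices, stripping only the final slice.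
import Mathlib
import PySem

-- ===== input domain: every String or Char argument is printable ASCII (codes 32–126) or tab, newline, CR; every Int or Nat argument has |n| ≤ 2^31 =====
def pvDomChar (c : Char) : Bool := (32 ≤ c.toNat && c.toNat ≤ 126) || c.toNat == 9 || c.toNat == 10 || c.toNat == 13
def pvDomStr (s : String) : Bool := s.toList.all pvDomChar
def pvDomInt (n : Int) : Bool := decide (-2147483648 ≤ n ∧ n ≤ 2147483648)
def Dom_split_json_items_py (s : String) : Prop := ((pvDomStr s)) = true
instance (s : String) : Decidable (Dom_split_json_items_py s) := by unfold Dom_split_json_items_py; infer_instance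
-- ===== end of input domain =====

-- B replaces A's single accumulate-and-flush loop by two passes: one pass recording
-- the indices of top-level commas, then slicing between consecutive indices (alternative decomposition, same cost).

-- ===== PORT A =====
def pvStepA (st : Int × List Char × List String) (ch : Char) : Int × List Char × List String :=
  let d := if ch = '{' then st.1 + 1 else if ch = '}' then st.1 - 1 else st.1
  if ch = ',' ∧ d = 0 then (d, [], st.2.2 ++ [String.ofList st.2.1])
  else (d, st.2.1 ++ [ch], st.2.2)

def split_json_items_py (s : String) : List String :=
  let st := s.toList.foldl pvStepA (0, [], [])
  if st.2.1 ≠ [] then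
    let tail := PySem.Chars.strip st.2.1         -- "".join(current).strip()
    if tail ≠ [] then st.2.2 ++ [String.ofList tail] else st.2.2
  else st.2.2

-- ===== PORT B =====
def pvStepC (st : Int × List Int) (p : Int × Char) : Int × List Int :=
  let d := if p.2 = '{' then st.1 + 1 else if p.2 = '}' then st.1 - 1 else st.1
  if p.2 = ',' ∧ d = 0 then (d, st.2 ++ [p.1]) else (d, st.2)

def pvStepS (cs : List Char) (st : Int × List String) (i : Int) : Int × List String :=
  (i + 1, st.2 ++ [String.ofList (PySem.List.slice cs (some st.1) (some i))])   -- s[start:i]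

def split_json_items_py_alt (s : String) : List String :=
  let cs := s.toList
  let commas := ((PySem.List.enumerate cs 0).foldl pvStepC (0, [])).2
  let fin := commas.foldl (pvStepS cs) (0, [])
  let tail := PySem.Chars.strip (PySem.List.slice cs (some fin.1) none)   -- s[start:].strip()
  if tail ≠ [] then fin.2 ++ [String.ofList tail] else fin.2

-- ===== PRECONDITION & SPEC =====
def Spec_split_json_items_py (s : String) (out : List String) : Prop := out = split_json_items_py_alt s
instance (s : String) (out : List String) : Decidable (Spec_split_json_items_py s out) := by unfold Spec_split_json_items_py; infer_instance

-- ===== CLAIM (what is proved, stated in full; the proofs are below) =====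
def Claim_equal_split_json_items_py : Prop := ∀ (s : String), Dom_split_json_items_py s → Spec_split_json_items_py s (split_json_items_py s)

-- ===== LEMMAS AND PROOFS =====

-- reference recursion: (segments flushed at top-level commas, pending chars)
def pvSegs (d : Int) (cur : List Char) : List Char → List String × List Char
  | [] => ([], cur)
  | ch :: t =>
    let d' := if ch = '{' then d + 1 else if ch = '}' then d - 1 else d
    if ch = ',' ∧ d' = 0 then
      let r := pvSegs d' [] t
      (String.ofList cur :: r.1, r.2)
    else pvSegs d' (cur ++ [ch]) t

-- reference recursion: indices (offset n) of top-level commas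
def pvIdxs (d : Int) (n : Nat) : List Char → List Int
  | [] => []
  | ch :: t =>
    let d' := if ch = '{' then d + 1 else if ch = '}' then d - 1 else d
    if ch = ',' ∧ d' = 0 then (n : Int) :: pvIdxs d' (n + 1) t else pvIdxs d' (n + 1) t

theorem pvA_fold (l : List Char) : ∀ (d : Int) (cur : List Char) (items : List String),
    ∃ dF, List.foldl pvStepA (d, cur, items) l
      = (dF, (pvSegs d cur l).2, items ++ (pvSegs d cur l).1) := by
  induction l with
  | nil => intro d cur items; exact ⟨d, by simp [pvSegs]⟩
  | cons ch t ih =>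
    intro d cur items
    by_cases h : ch = ',' ∧ (if ch = '{' then d + 1 else if ch = '}' then d - 1 else d) = 0
    · obtain ⟨hc, hz⟩ := h
      subst hc
      have hz' : d = 0 := by simpa using hz
      subst hz'
      obtain ⟨dF, hF⟩ := ih 0 [] (items ++ [String.ofList cur])
      exact ⟨dF, by simp [pvStepA, pvSegs, hF]⟩
    · obtain ⟨dF, hF⟩ := ih (if ch = '{' then d + 1 else if ch = '}' then d - 1 else d) (cur ++ [ch]) items
      exact ⟨dF, by simp [pvStepA, pvSegs, h, hF]⟩

theorem pvC_fold (l : List Char) : ∀ (n : Nat) (d : Int) (acc : List Int),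
    ∃ dF, List.foldl pvStepC (d, acc) (PySem.List.enumerate l (n : Int))
      = (dF, acc ++ pvIdxs d n l) := by
  induction l with
  | nil => intro n d acc; exact ⟨d, by simp [PySem.List.enumerate_nil, pvIdxs]⟩
  | cons ch t ih =>
    intro n d acc
    by_cases h : ch = ',' ∧ (if ch = '{' then d + 1 else if ch = '}' then d - 1 else d) = 0
    · obtain ⟨hc, hz⟩ := h
      subst hc
      have hz' : d = 0 := by simpa using hz
      subst hz'
      obtain ⟨dF, hF⟩ := ih (n + 1) 0 (acc ++ [(n : Int)])
      refine ⟨dF, ?_⟩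
      rw [PySem.List.enumerate_cons]
      push_cast at hF ⊢
      simp [pvStepC, pvIdxs, hF]
    · obtain ⟨dF, hF⟩ := ih (n + 1) (if ch = '{' then d + 1 else if ch = '}' then d - 1 else d) acc
      refine ⟨dF, ?_⟩
      rw [PySem.List.enumerate_cons]
      push_cast at hF ⊢
      simp [pvStepC, pvIdxs, h, hF]

theorem pvS_fold (l : List Char) : ∀ (cs : List Char) (n st : Nat) (d : Int) (items : List String),
    cs.drop n = l → st ≤ n → st ≤ cs.length →
    (List.foldl (pvStepS cs) ((st : Int), items) (pvIdxs d n l)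
       = (((cs.length - (pvSegs d ((cs.drop st).take (n - st)) l).2.length : Nat) : Int),
          items ++ (pvSegs d ((cs.drop st).take (n - st)) l).1))
    ∧ cs.drop (cs.length - (pvSegs d ((cs.drop st).take (n - st)) l).2.length)
        = (pvSegs d ((cs.drop st).take (n - st)) l).2 := by
  induction l with
  | nil =>
    intro cs n st d items hdrop hstn hstl
    have hlen : cs.length ≤ n := by
      have := congrArg List.length hdrop; simp at this; omega
    have hcur : (cs.drop st).take (n - st) = cs.drop st := by
      apply List.take_of_length_le; simp; omega
    have hst : cs.length - (cs.length - (cs.length - st)) = cs.length - st := by omega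
    have hst2 : cs.length - (cs.length - st) = st := by omega
    refine ⟨?_, ?_⟩
    · simp [pvIdxs, pvSegs, hcur, hst2]
    · simp [pvSegs, hcur, hst2]
  | cons ch t ih =>
    intro cs n st d items hdrop hstn hstl
    have hnlen : n < cs.length := by
      rcases Nat.lt_or_ge n cs.length with hh | hh
      · exact hh
      · simp [List.drop_eq_nil_of_le hh] at hdrop
    have hdt : cs.drop (n + 1) = t := by
      rw [← List.tail_drop, hdrop]
      rfl
    have hgn : cs[n]? = some ch := by
      have h0 : (cs.drop n)[0]? = some ch := by rw [hdrop]; rfl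
      rw [List.getElem?_drop] at h0; simpa using h0
    by_cases h : ch = ',' ∧ (if ch = '{' then d + 1 else if ch = '}' then d - 1 else d) = 0
    · obtain ⟨hc, hz⟩ := h
      subst hc
      have hz' : d = 0 := by simpa using hz
      subst hz'
      have ihres := ih cs (n + 1) (n + 1) 0
        (items ++ [String.ofList ((cs.drop st).take (n - st))]) hdt (le_refl _) (by omega)
      simp only [Nat.sub_self, List.take_zero] at ihres
      obtain ⟨ih1, ih2⟩ := ihres
      have e1 : pvIdxs 0 n (',' :: t) = (n : Int) :: pvIdxs 0 (n + 1) t := by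
        simp [pvIdxs]
      have e2 : pvSegs 0 ((cs.drop st).take (n - st)) (',' :: t)
          = (String.ofList ((cs.drop st).take (n - st)) :: (pvSegs 0 [] t).1, (pvSegs 0 [] t).2) := by
        simp [pvSegs]
      have hcast : ((n : Int) + 1) = ((n + 1 : Nat) : Int) := by push_cast; ring
      refine ⟨?_, ?_⟩
      have estep : pvStepS cs ((st : Int), items) ((n : Int))
          = (((n + 1 : Nat) : Int), items ++ [String.ofList ((cs.drop st).take (n - st))]) := by
        unfold pvStepS
        rw [PySem.List.slice_natCast, hcast]
      · rw [e1, e2, List.foldl_cons, estep, ih1]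
        simp
      · rw [e2]
        exact ih2
    · have d' : Int := if ch = '{' then d + 1 else if ch = '}' then d - 1 else d
      have hcur : (cs.drop st).take (n - st) ++ [ch] = (cs.drop st).take (n + 1 - st) := by
        have h1 : n + 1 - st = (n - st) + 1 := by omega
        rw [h1, List.take_add_one, List.getElem?_drop]
        have h2 : st + (n - st) = n := by omega
        rw [h2, hgn]
        rfl
      have ihres := ih cs (n + 1) st (if ch = '{' then d + 1 else if ch = '}' then d - 1 else d)
        items hdt (by omega) hstl
      rw [← hcur] at ihres
      obtain ⟨ih1, ih2⟩ := ihres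
      refine ⟨?_, ?_⟩
      · simp only [pvIdxs, h, if_false]
        rw [ih1]
        simp only [pvSegs, h, if_false]
      · simp only [pvSegs, h, if_false]
        exact ih2

theorem pv_strip_nil : PySem.Chars.strip ([] : List Char) = [] := by decide

-- ===== VERDICT (by name: the statement is the Claim_ definition above) =====
theorem split_json_items_py_spec : Claim_equal_split_json_items_py := by
  intro s _
  unfold Spec_split_json_items_py split_json_items_py split_json_items_py_alt
  obtain ⟨dA, hA⟩ := pvA_fold s.toList 0 [] []
  obtain ⟨dC, hC⟩ := pvC_fold s.toList 0 0 []
  obtain ⟨hS1, hS2⟩ := pvS_fold s.toList s.toList 0 0 0 [] (by simp) (le_refl 0) (Nat.zero_le _)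
  simp only [Nat.cast_zero, List.drop_zero, List.take_zero, Nat.sub_zero, List.nil_append]
    at hA hC hS1 hS2
  simp only [hA, hC, hS1]
  rw [PySem.List.slice_from_natCast, hS2]
  cases hr2 : (pvSegs 0 [] s.toList).2 with
  | nil => simp [pv_strip_nil]
  | cons a l => simp
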